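-- pv_equiv track=rewrite | github.com/taehee-kim-dev/Problem-solving | Programmers/Kakao/Level3/2020_KAKAO_BLIND_RECRUITMENT/Lock_and_key.py | make_extension_rock
-- ===== SOURCE A (Python) =====
-- def make_extension_rock(tmp_lock, extension_lock_size, lock_additional_one_side_size, lock_size):
--     extension_lock = [[1 for col in range(extension_lock_size)] for row in range(extension_lock_size)]
--     for row in range(lock_additional_one_side_size,
--                      (lock_additional_one_side_size + lock_size - 1) + 1):  # index : 2 ~ 4(2 + 3 - 1)
--         for col in range(lock_additional_one_side_size, (lock_additional_one_side_size + lock_size - 1) + 1):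
--             extension_lock[row][col] = tmp_lock[row - lock_additional_one_side_size][
--                 col - lock_additional_one_side_size]
--     return extension_lock
-- ===== SOURCE B (Python) =====
-- def make_extension_rock(tmp_lock, extension_lock_size, lock_additional_one_side_size, lock_size):
--     m = lock_additional_one_side_size
--     return [
--         [1] * m + tmp_lock[r - m][:lock_size] + [1] * (extension_lock_size - m - lock_size)
--         if m <= r < m + lock_size
--         else [1] * extension_lock_size
--         for r in range(extension_lock_size)
--     ]
-- ===== Notes on version B (the rewrite author's own statement) =====
-- stated objective: simpler
-- what changed: B builds the grid in one pass, constructing each row directly by concatenation ([1]*pad + lock row slice + [1]*pad) instead of allocating an all-ones grid and overwriting its center with a nested index loop.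
-- outside the precondition, e.g. on make_extension_rock([[5]], 1, -1, 1): A returns [[5]], B returns [[1]]
import Mathlib
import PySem

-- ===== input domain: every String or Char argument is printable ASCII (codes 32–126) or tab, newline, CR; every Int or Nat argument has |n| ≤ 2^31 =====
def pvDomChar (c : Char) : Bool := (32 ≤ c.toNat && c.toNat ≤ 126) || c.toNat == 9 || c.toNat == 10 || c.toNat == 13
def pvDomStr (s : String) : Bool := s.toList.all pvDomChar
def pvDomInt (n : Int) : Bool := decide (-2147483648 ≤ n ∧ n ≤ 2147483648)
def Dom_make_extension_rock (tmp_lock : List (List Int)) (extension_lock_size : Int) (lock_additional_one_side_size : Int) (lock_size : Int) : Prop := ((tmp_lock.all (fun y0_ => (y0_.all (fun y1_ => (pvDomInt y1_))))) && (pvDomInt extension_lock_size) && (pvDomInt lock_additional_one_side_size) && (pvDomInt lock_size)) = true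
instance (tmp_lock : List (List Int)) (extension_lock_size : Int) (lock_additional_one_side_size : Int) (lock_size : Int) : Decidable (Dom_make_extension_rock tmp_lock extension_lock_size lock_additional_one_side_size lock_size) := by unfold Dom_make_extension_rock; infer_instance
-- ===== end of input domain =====

-- B builds each row of the padded grid directly by concatenation in one pass instead of
-- allocating an all-ones grid and overwriting its center with a nested index loop (objective: simpler).

-- ===== PORT A =====
def make_extension_rock (tmp_lock : List (List Int)) (extension_lock_size : Int) (lock_additional_one_side_size : Int) (lock_size : Int) : List (List Int) :=
  let extension_lock :=
    (PySem.List.pyRange 0 extension_lock_size 1).map (fun _ =>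
      (PySem.List.pyRange 0 extension_lock_size 1).map (fun _ => (1 : Int)))
  (PySem.List.pyRange lock_additional_one_side_size
      (lock_additional_one_side_size + lock_size - 1 + 1) 1).foldl
    (fun g row =>
      (PySem.List.pyRange lock_additional_one_side_size
          (lock_additional_one_side_size + lock_size - 1 + 1) 1).foldl
        (fun g col =>
          PySem.List.pySetD g row
            (PySem.List.pySetD (PySem.List.pyGetD g row []) col
              (PySem.List.pyGetD
                (PySem.List.pyGetD tmp_lock (row - lock_additional_one_side_size) [])
                (col - lock_additional_one_side_size) 0)))
        g)
    extension_lock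

-- ===== PORT B =====
def make_extension_rock_alt (tmp_lock : List (List Int)) (extension_lock_size : Int) (lock_additional_one_side_size : Int) (lock_size : Int) : List (List Int) :=
  (PySem.List.pyRange 0 extension_lock_size 1).map (fun r =>
    if lock_additional_one_side_size ≤ r ∧ r < lock_additional_one_side_size + lock_size then
      List.replicate lock_additional_one_side_size.toNat (1 : Int)
        ++ PySem.List.slice (PySem.List.pyGetD tmp_lock (r - lock_additional_one_side_size) []) none (some lock_size)
        ++ List.replicate (extension_lock_size - lock_additional_one_side_size - lock_size).toNat (1 : Int)
    else
      List.replicate extension_lock_size.toNat (1 : Int))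

-- ===== PRECONDITION & SPEC =====
-- Pre_ is the natural domain of the task: either the copy loop is empty (lock_size ≤ 0), or the
-- lock block fits inside the grid and tmp_lock supplies it.  Besides A's IndexError inputs this
-- excludes inputs on which A only returns via Python's accidental negative-index wraparound
-- (e.g. a negative padding), which places lock cells at wrapped positions.
def Pre_make_extension_rock (tmp_lock : List (List Int)) (extension_lock_size : Int) (lock_additional_one_side_size : Int) (lock_size : Int) : Prop :=
  lock_size ≤ 0 ∨
    (0 ≤ lock_additional_one_side_size ∧
      lock_additional_one_side_size + lock_size ≤ extension_lock_size ∧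
      lock_size ≤ (tmp_lock.length : Int) ∧
      ∀ row ∈ tmp_lock.take lock_size.toNat, lock_size ≤ (row.length : Int))
instance (tmp_lock : List (List Int)) (extension_lock_size : Int) (lock_additional_one_side_size : Int) (lock_size : Int) : Decidable (Pre_make_extension_rock tmp_lock extension_lock_size lock_additional_one_side_size lock_size) := by unfold Pre_make_extension_rock; infer_instance

def pvWitness_make_extension_rock : List (List Int) × Int × Int × Int := ([[7, 8], [9, 10]], 4, 1, 2)

def Spec_make_extension_rock (tmp_lock : List (List Int)) (extension_lock_size : Int) (lock_additional_one_side_size : Int) (lock_size : Int) (out : List (List Int)) : Prop := out = make_extension_rock_alt tmp_lock extension_lock_size lock_additional_one_side_size lock_size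
instance (tmp_lock : List (List Int)) (extension_lock_size : Int) (lock_additional_one_side_size : Int) (lock_size : Int) (out : List (List Int)) : Decidable (Spec_make_extension_rock tmp_lock extension_lock_size lock_additional_one_side_size lock_size out) := by unfold Spec_make_extension_rock; infer_instance

-- ===== CLAIM (what is proved, stated in full; the proofs are below) =====
def Claim_equal_make_extension_rock : Prop := ∀ (tmp_lock : List (List Int)) (extension_lock_size : Int) (lock_additional_one_side_size : Int) (lock_size : Int), Dom_make_extension_rock tmp_lock extension_lock_size lock_additional_one_side_size lock_size → Pre_make_extension_rock tmp_lock extension_lock_size lock_additional_one_side_size lock_size → Spec_make_extension_rock tmp_lock extension_lock_size lock_additional_one_side_size lock_size (make_extension_rock tmp_lock extension_lock_size lock_additional_one_side_size lock_size)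

-- ===== LEMMAS AND PROOFS =====

-- any fold whose step preserves length preserves length
lemma pv_length_foldl {α β : Type} (step : List α → β → List α)
    (h : ∀ g x, (step g x).length = g.length) :
    ∀ (l : List β) (g : List α), (l.foldl step g).length = g.length := by
  intro l
  induction l with
  | nil => intro g; rfl
  | cons x t ih => intro g; rw [List.foldl_cons, ih, h]

-- a constant comprehension over range(E) is a replicate
lemma pv_const_map {α : Type} (E : Int) (c : α) :
    (PySem.List.pyRange 0 E 1).map (fun _ => c) = List.replicate E.toNat c := by
  rw [PySem.List.pyRange_one]
  simp [Function.comp_def, List.map_const']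

-- the inner grid loop only rewrites row n: it is a set of a row-level fold
lemma pv_grid_inner {ι : Type} (cols : List ι) (idx : ι → Int) (v : ι → Int) :
    ∀ (g : List (List Int)) (n : Nat), n < g.length →
    cols.foldl (fun g col => PySem.List.pySetD g (n : Int)
        (PySem.List.pySetD (PySem.List.pyGetD g (n : Int) []) (idx col) (v col))) g
      = g.set n (cols.foldl (fun rl col => PySem.List.pySetD rl (idx col) (v col)) (g.getD n [])) := by
  induction cols with
  | nil =>
      intro g n hn
      simp only [List.foldl_nil, List.getD_eq_getElem _ _ hn, List.set_getElem_self]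
  | cons c cs ih =>
      intro g n hn
      rw [List.foldl_cons, List.foldl_cons,
        ih (PySem.List.pySetD g (n : Int)
            (PySem.List.pySetD (PySem.List.pyGetD g (n : Int) []) (idx c) (v c))) n
          (by simpa [PySem.List.pySetD_natCast] using hn)]
      simp only [PySem.List.pySetD_natCast, PySem.List.pyGetD_natCast]
      rw [List.set_set]
      congr 1
      rw [List.getD_eq_getElem _ _ (by simpa using hn), List.getElem_set_self (by simpa using hn),
        List.getD_eq_getElem _ _ hn]

-- folding `g[M+k] := T k` over k < L, elementwise
lemma pv_set_range {α : Type} (M : Nat) (T : Nat → α) :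
    ∀ (L : Nat) (g : List α) (j : Nat), M + L ≤ g.length →
    ((List.range L).foldl (fun g k => g.set (M + k) (T k)) g)[j]? =
      if M ≤ j ∧ j < M + L then some (T (j - M)) else g[j]? := by
  intro L
  induction L with
  | zero => intro g j _; rw [if_neg (by omega)]; rfl
  | succ L ih =>
      intro g j h
      rw [List.range_succ, List.foldl_append, List.foldl_cons, List.foldl_nil,
        List.getElem?_set]
      have hlen : ((List.range L).foldl (fun g k => g.set (M + k) (T k)) g).length = g.length :=
        pv_length_foldl _ (by intro g x; exact List.length_set ..) _ _
      by_cases hj : M + L = j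
      · subst hj
        rw [if_pos rfl, if_pos (show M + L < _ by rw [hlen]; omega), if_pos (by omega),
          Nat.add_sub_cancel_left]
      · rw [if_neg hj, ih g j (by omega)]
        split_ifs with h1 h2 h2 <;> first | rfl | omega

-- the outer grid loop, elementwise: row j of the result
lemma pv_outer {ι : Type} (cols : List ι) (idx : ι → Int) (v : Nat → ι → Int) (M : Nat) :
    ∀ (L : Nat) (g : List (List Int)) (j : Nat), L = 0 ∨ M + L ≤ g.length →
    ((List.range L).foldl (fun g k =>
        cols.foldl (fun g col => PySem.List.pySetD g (((M + k : Nat) : Int))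
          (PySem.List.pySetD (PySem.List.pyGetD g (((M + k : Nat) : Int)) []) (idx col) (v k col))) g) g)[j]? =
      if M ≤ j ∧ j < M + L then
        some (cols.foldl (fun rl col => PySem.List.pySetD rl (idx col) (v (j - M) col)) (g.getD j []))
      else g[j]? := by
  intro L
  induction L with
  | zero => intro g j _; rw [if_neg (by omega)]; rfl
  | succ L ih =>
      intro g j h'
      have h : M + (L + 1) ≤ g.length := by rcases h' with h' | h' <;> omega
      rw [List.range_succ, List.foldl_append, List.foldl_cons, List.foldl_nil]
      have hstep : ∀ (k : Nat) (g : List (List Int)),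
          ((cols.foldl (fun g col => PySem.List.pySetD g (((M + k : Nat) : Int))
            (PySem.List.pySetD (PySem.List.pyGetD g (((M + k : Nat) : Int)) []) (idx col) (v k col))) g)).length
            = g.length := by
        intro k g
        exact pv_length_foldl _ (by intro g x; simp) _ _
      have hlen : ((List.range L).foldl (fun g k =>
          cols.foldl (fun g col => PySem.List.pySetD g (((M + k : Nat) : Int))
            (PySem.List.pySetD (PySem.List.pyGetD g (((M + k : Nat) : Int)) []) (idx col) (v k col))) g) g).length
          = g.length := pv_length_foldl _ (fun g k => hstep k g) _ _
      rw [pv_grid_inner cols idx (v L) _ (M + L) (by rw [hlen]; omega)]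
      rw [List.getElem?_set]
      by_cases hj : M + L = j
      · subst hj
        rw [if_pos rfl, if_pos (show M + L < _ by rw [hlen]; omega), if_pos (by omega),
          Nat.add_sub_cancel_left]
        have hg : ((List.range L).foldl (fun g k =>
            cols.foldl (fun g col => PySem.List.pySetD g (((M + k : Nat) : Int))
              (PySem.List.pySetD (PySem.List.pyGetD g (((M + k : Nat) : Int)) []) (idx col) (v k col))) g) g).getD (M + L) []
            = g.getD (M + L) [] := by
          rw [List.getD_eq_getElem?_getD, List.getD_eq_getElem?_getD, ih g (M + L) (Or.inr (by omega)),
            if_neg (by omega)]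
        rw [hg]
      · rw [ih g j (by omega)]
        split_ifs with h1 h2 h2 <;> first | rfl | omega

-- a fold of single-cell sets over an all-ones row is the three-piece concatenation
lemma pv_row_concat {α : Type} (M L EN : Nat) (row : List α) (one d : α)
    (hrow : L ≤ row.length) (hE : M + L ≤ EN) :
    (List.range L).foldl (fun rl k => rl.set (M + k) (row.getD k d)) (List.replicate EN one)
      = List.replicate M one ++ row.take L ++ List.replicate (EN - M - L) one := by
  apply List.ext_getElem?
  intro j
  rw [pv_set_range M (fun k => row.getD k d) L _ j (by simp; omega)]
  by_cases h1 : j < M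
  · rw [if_neg (by omega)]
    rw [List.getElem?_append_left (by simp [List.length_take]; omega),
      List.getElem?_append_left (by simp; omega)]
    simp [List.getElem?_replicate, h1, if_pos (by omega : j < EN)]
  · by_cases h2 : j < M + L
    · rw [if_pos (by omega)]
      rw [List.getElem?_append_left (by simp [List.length_take]; omega),
        List.getElem?_append_right (by simp; omega)]
      simp only [List.length_replicate, List.getElem?_take]
      rw [if_pos (by omega)]
      rw [List.getD_eq_getElem _ _ (by omega), List.getElem?_eq_getElem (by omega)]
    · rw [if_neg (by omega)]
      by_cases h3 : j < EN
      · rw [List.getElem?_append_right (by simp [List.length_take]; omega),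
          List.getElem?_replicate, List.getElem?_replicate]
        rw [if_pos h3, if_pos (by simp [List.length_take]; omega)]
      · rw [List.getElem?_eq_none (by simp; omega), List.getElem?_eq_none
          (by simp [List.length_take]; omega)]

-- range(m, m+b) is a shifted List.range
lemma pv_range_shift (a b : Int) : PySem.List.pyRange a (a + b) 1
    = (List.range b.toNat).map (fun (k : Nat) => a + (k : Int)) := by
  rw [PySem.List.pyRange_one, show a + b - a = b by ring]

lemma pv_range0 (b : Int) : PySem.List.pyRange 0 b 1
    = (List.range b.toNat).map (fun (k : Nat) => (k : Int)) := by
  simpa using pv_range_shift 0 b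

-- ===== VERDICT (by name: the statement is the Claim_ definition above) =====
theorem make_extension_rock_spec : Claim_equal_make_extension_rock := by
  intro tl E m ls _ hpre
  unfold Spec_make_extension_rock
  have hrange : m + ls - 1 + 1 = m + ls := by ring
  rcases hpre with hls | ⟨hm, hE, hlen, hrows⟩
  · -- the copy loop is empty: both sides are the all-ones grid
    simp only [make_extension_rock, make_extension_rock_alt]
    rw [hrange, PySem.List.pyRange_one_eq_nil (by omega), List.foldl_nil]
    apply List.map_congr_left
    intro r hr
    rw [PySem.List.mem_pyRange_one] at hr
    rw [if_neg (by omega), pv_const_map]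
  · simp only [make_extension_rock, make_extension_rock_alt]
    rw [hrange]
    rw [pv_range_shift m ls]
    simp only [List.foldl_map]
    simp only [show ∀ k : Nat, m + (k : Int) = ((m.toNat + k : Nat) : Int) by
      intro k; push_cast; omega]
    simp only [show ∀ k : Nat, ((m.toNat + k : Nat) : Int) - m = (k : Int) by
      intro k; push_cast; omega]
    rw [pv_const_map, pv_const_map, pv_range0 E, List.map_map]
    apply List.ext_getElem?
    intro j
    rw [pv_outer (List.range ls.toNat)
        (fun (y : Nat) => ((m.toNat + y : Nat) : Int))
        (fun (k y : Nat) => PySem.List.pyGetD (PySem.List.pyGetD tl ((k : Nat) : Int) []) ((y : Nat) : Int) 0)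
        m.toNat ls.toNat (List.replicate E.toNat (List.replicate E.toNat 1)) j
        (by simp only [List.length_replicate]; omega)]
    rw [List.getElem?_map]
    by_cases hj : j < E.toNat
    · rw [List.getElem?_range hj]
      simp only [Option.map_some, Function.comp_apply]
      by_cases hblock : m.toNat ≤ j ∧ j < m.toNat + ls.toNat
      · rw [if_pos hblock,
          if_pos (show m ≤ (j : Int) ∧ (j : Int) < m + ls by constructor <;> omega)]
        rw [List.getD_eq_getElem _ _ (by simpa using hj), List.getElem_replicate]
        rw [show (j : Int) - m = ((j - m.toNat : Nat) : Int) by omega]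
        simp only [PySem.List.pySetD_natCast, PySem.List.pyGetD_natCast]
        rw [PySem.List.slice_to _ (by omega : (0 : Int) ≤ ls)]
        rw [show (E - m - ls).toNat = E.toNat - m.toNat - ls.toNat by omega]
        have hjt : j - m.toNat < tl.length := by omega
        have hmem : tl.getD (j - m.toNat) [] ∈ tl.take ls.toNat := by
          rw [List.getD_eq_getElem _ _ hjt,
            show tl[j - m.toNat] = (tl.take ls.toNat)[j - m.toNat]'
              (by simp only [List.length_take]; omega) from (List.getElem_take ..).symm]
          exact List.getElem_mem _
        have hL : ls.toNat ≤ (tl.getD (j - m.toNat) []).length := by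
          have := hrows _ hmem; omega
        rw [pv_row_concat m.toNat ls.toNat E.toNat (tl.getD (j - m.toNat) []) 1 0 hL (by omega)]
      · rw [if_neg hblock,
          if_neg (show ¬ (m ≤ (j : Int) ∧ (j : Int) < m + ls) by
            intro h; exact hblock ⟨by omega, by omega⟩)]
        rw [List.getElem?_replicate, if_pos hj]
    · rw [if_neg (by omega),
        List.getElem?_eq_none (show (List.range E.toNat).length ≤ j by
          simp only [List.length_range]; omega),
        List.getElem?_eq_none (by simp only [List.length_replicate]; omega)]
      rfl
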